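-- pv_equiv track=rewrite | github.com/GregoryREvans/evans | evans/general_tools/padovan_cycle.py | padovan
-- ===== SOURCE A (Python) =====
-- def padovan(iters, seq=[1, 1, 1, 1]):
--     final = []
--     for n in range(iters):
--         pPrevPrev, pPrev, pCurr, pNext = seq[0], seq[1], seq[2], seq[3]
--         for i in range(3, n + 1):
--             pNext = pPrevPrev + pPrev
--             pPrevPrev = pPrev
--             pPrev = pCurr
--             pCurr = pNext
--         final.append(pNext)
--     return final
-- ===== SOURCE B (Python) =====
-- def padovan(iters, seq=[1, 1, 1, 1]):
--     if iters <= 0: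
--         return []
--     head = [seq[3]] * min(iters, 3)
--     pp, pv, pc = seq[0], seq[1], seq[2]
--     tail = []
--     for _ in range(3, iters):
--         nxt = pp + pv
--         pp, pv, pc = pv, pc, nxt
--         tail.append(nxt)
--     return head + tail
-- ===== Notes on version B (the rewrite author's own statement) =====
-- stated objective: faster
-- what changed: B maintains the recurrence state across one single pass, appending each new value, instead of recomputing the whole recurrence from seq for every output index.
import Mathlib
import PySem

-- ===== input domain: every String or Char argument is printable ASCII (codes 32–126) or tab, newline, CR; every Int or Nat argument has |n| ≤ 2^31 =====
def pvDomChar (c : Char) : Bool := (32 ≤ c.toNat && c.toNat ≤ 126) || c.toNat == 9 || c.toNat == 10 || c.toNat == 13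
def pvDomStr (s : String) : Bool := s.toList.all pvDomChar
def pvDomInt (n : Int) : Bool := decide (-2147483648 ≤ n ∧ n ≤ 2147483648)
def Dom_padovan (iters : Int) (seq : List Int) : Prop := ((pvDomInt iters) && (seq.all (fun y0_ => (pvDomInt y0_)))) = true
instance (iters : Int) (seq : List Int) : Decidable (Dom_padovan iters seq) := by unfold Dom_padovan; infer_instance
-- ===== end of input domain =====

-- B replaces A's per-index recomputation of the recurrence by one incremental pass carrying the state (objective: faster, O(iters) vs O(iters^2)).


-- ===== PORT A =====
def padovan (iters : Int) (seq : List Int) : List Int :=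
  (PySem.List.pyRange 0 iters 1).foldl (fun final n =>
    let pPrevPrev := PySem.List.pyGetD seq 0 0
    let pPrev := PySem.List.pyGetD seq 1 0
    let pCurr := PySem.List.pyGetD seq 2 0
    let pNext := PySem.List.pyGetD seq 3 0
    let st := (PySem.List.pyRange 3 (n + 1) 1).foldl
      (fun (s : Int × Int × Int × Int) _ =>
        let pNext' := s.1 + s.2.1
        (s.2.1, s.2.2.1, pNext', pNext'))
      (pPrevPrev, pPrev, pCurr, pNext)
    final ++ [st.2.2.2]) []

-- ===== PORT B =====
def padovan_alt (iters : Int) (seq : List Int) : List Int :=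
  if iters ≤ 0 then []
  else
    let head := List.replicate (min iters 3).toNat (PySem.List.pyGetD seq 3 0)
    let st := (PySem.List.pyRange 3 iters 1).foldl
      (fun (s : List Int × Int × Int × Int) _ =>
        let nxt := s.2.1 + s.2.2.1
        (s.1 ++ [nxt], s.2.2.1, s.2.2.2, nxt))
      ([], PySem.List.pyGetD seq 0 0, PySem.List.pyGetD seq 1 0, PySem.List.pyGetD seq 2 0)
    head ++ st.1

-- ===== PRECONDITION & SPEC =====
-- Pre_ excludes exactly the inputs where Python A raises IndexError: iters > 0 with fewer than 4 seed values (seq[0..3] is read).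
def Pre_padovan (iters : Int) (seq : List Int) : Prop := 0 < iters → 4 ≤ seq.length
instance (iters : Int) (seq : List Int) : Decidable (Pre_padovan iters seq) := by unfold Pre_padovan; infer_instance
def pvWitness_padovan : Int × List Int := (6, [1, 1, 1, 1])
def Spec_padovan (iters : Int) (seq : List Int) (out : List Int) : Prop := out = padovan_alt iters seq
instance (iters : Int) (seq : List Int) (out : List Int) : Decidable (Spec_padovan iters seq out) := by unfold Spec_padovan; infer_instance

-- ===== CLAIM (what is proved, stated in full; the proofs are below) =====
def Claim_equal_padovan : Prop := ∀ (iters : Int) (seq : List Int), Dom_padovan iters seq → Pre_padovan iters seq → Spec_padovan iters seq (padovan iters seq)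

-- ===== LEMMAS AND PROOFS =====

-- one step of the Padovan recurrence on (pPrevPrev, pPrev, pCurr)
def pvStep (s : Int × Int × Int) : Int × Int × Int := (s.2.1, s.2.2, s.1 + s.2.1)

def pvIter : Nat → (Int × Int × Int) → (Int × Int × Int)
  | 0, s => s
  | k + 1, s => pvIter k (pvStep s)

-- A's inner loop: the fold over any list of length k computes pvIter k, and the 4th
-- component is the seed pNext for k = 0, else the 3rd component of pvIter k.
lemma pvInnerA (l : List Int) (s : Int × Int × Int) (pn : Int) :
    l.foldl (fun (t : Int × Int × Int × Int) _ =>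
        let pNext' := t.1 + t.2.1
        (t.2.1, t.2.2.1, pNext', pNext')) (s.1, s.2.1, s.2.2, pn)
      = ((pvIter l.length s).1, (pvIter l.length s).2.1, (pvIter l.length s).2.2,
         if l.length = 0 then pn else (pvIter l.length s).2.2) := by
  induction l generalizing s pn with
  | nil => simp [pvIter]
  | cons x xs ih =>
    simp only [List.foldl_cons]
    have := ih (pvStep s) (s.1 + s.2.1)
    simp only [pvStep] at this
    simp only [this, List.length_cons]
    rcases xs with _ | ⟨y, ys⟩
    · simp [pvIter, pvStep]
    · simp [pvIter, pvStep]

-- B's fold: accumulates the next l.length recurrence values while advancing the state.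
lemma pvInnerB (l : List Int) (acc : List Int) (s : Int × Int × Int) :
    l.foldl (fun (t : List Int × Int × Int × Int) _ =>
        let nxt := t.2.1 + t.2.2.1
        (t.1 ++ [nxt], t.2.2.1, t.2.2.2, nxt)) (acc, s.1, s.2.1, s.2.2)
      = (acc ++ (List.range l.length).map (fun k => (pvIter (k + 1) s).2.2),
         (pvIter l.length s).1, (pvIter l.length s).2.1, (pvIter l.length s).2.2) := by
  induction l generalizing acc s with
  | nil => simp [pvIter]
  | cons x xs ih =>
    simp only [List.foldl_cons]
    have := ih (acc ++ [s.1 + s.2.1]) (pvStep s)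
    simp only [pvStep] at this
    rw [this]
    simp [List.range_succ_eq_map, pvIter, pvStep, List.map_map, Function.comp,
      List.append_assoc]

-- the common value at output index n
def pvVal (s : Int × Int × Int) (pn : Int) (n : Nat) : Int :=
  if n < 3 then pn else (pvIter (n - 2) s).2.2

lemma pvA_eq (N : Nat) (s : Int × Int × Int) (pn : Int) :
    (PySem.List.pyRange 0 (N : Int) 1).foldl (fun final n =>
      let st := (PySem.List.pyRange 3 (n + 1) 1).foldl
        (fun (t : Int × Int × Int × Int) _ =>
          let pNext' := t.1 + t.2.1
          (t.2.1, t.2.2.1, pNext', pNext'))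
        (s.1, s.2.1, s.2.2, pn)
      final ++ [st.2.2.2]) []
    = (List.range N).map (pvVal s pn) := by
  induction N with
  | zero => simp
  | succ N ih =>
    have h1 : ((N : Int) + 1) = ((N + 1 : Nat) : Int) := by push_cast; ring
    rw [← h1, PySem.List.pyRange_one_succ_right (by positivity), List.foldl_append, ih,
        List.range_succ]
    simp only [List.foldl_cons, List.foldl_nil, List.map_append, List.map_cons, List.map_nil]
    congr 1
    have hlen : (PySem.List.pyRange 3 ((N : Int) + 1) 1).length = N - 2 := by
      rw [PySem.List.length_pyRange_one]; omega
    rw [pvInnerA, hlen]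
    by_cases h : N < 3
    · simp [pvVal, h]
      omega
    · simp [pvVal, h]
      omega

-- the common list, written in B's head-plus-tail shape
lemma pvShape (N : Nat) (s : Int × Int × Int) (pn : Int) :
    (List.range N).map (pvVal s pn)
      = List.replicate (min N 3) pn
          ++ (List.range (N - 3)).map (fun k => (pvIter (k + 1) s).2.2) := by
  apply List.ext_getElem
  · simp only [List.length_map, List.length_range, List.length_append, List.length_replicate]
    omega
  · intro i h1 h2
    simp only [List.length_map, List.length_range] at h1
    rw [List.getElem_map, List.getElem_range]
    by_cases hi : i < 3
    · rw [List.getElem_append_left (by simp only [List.length_replicate]; omega)]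
      simp [pvVal, hi]
    · rw [List.getElem_append_right (by simp only [List.length_replicate]; omega)]
      simp only [List.length_append, List.length_replicate, List.length_map,
        List.length_range] at h2
      simp only [List.length_replicate, List.getElem_map, List.getElem_range]
      simp only [pvVal, if_neg hi]
      rw [Nat.min_eq_right (by omega : 3 ≤ N)]
      have he : i - 3 + 1 = i - 2 := by omega
      rw [he]

-- ===== VERDICT (by name: the statement is the Claim_ definition above) =====
theorem padovan_spec : Claim_equal_padovan := by
  intro iters seq _ hpre
  unfold Spec_padovan padovan padovan_alt
  by_cases hle : iters ≤ 0
  · rw [if_pos hle, PySem.List.pyRange_one_eq_nil hle]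
    simp
  · rw [if_neg hle]
    obtain ⟨N, hN⟩ : ∃ N : Nat, iters = (N : Int) := ⟨iters.toNat, by omega⟩
    subst hN
    have hA := pvA_eq N (PySem.List.pyGetD seq 0 0, PySem.List.pyGetD seq 1 0,
      PySem.List.pyGetD seq 2 0) (PySem.List.pyGetD seq 3 0)
    have hB := pvInnerB (PySem.List.pyRange 3 (N : Int) 1) []
      (PySem.List.pyGetD seq 0 0, PySem.List.pyGetD seq 1 0, PySem.List.pyGetD seq 2 0)
    have hBlen : (PySem.List.pyRange 3 (N : Int) 1).length = N - 3 := by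
      rw [PySem.List.length_pyRange_one]; omega
    rw [hBlen] at hB
    rw [hA, hB]
    simp only [List.nil_append]
    have hm : (min ((N : Int)) 3).toNat = min N 3 := by omega
    rw [hm]
    exact pvShape N _ _
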